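-- pv_equiv track=rewrite | github.com/bilonaireproject/my-python | mypy/util.py | soft_wrap
-- ===== SOURCE A (Python) =====
-- def split_words(msg: str) -> list[str]:
--     """Split line of text into words (but not within quoted groups)."""
--     next_word = ""
--     res: list[str] = []
--     allow_break = True
--     for c in msg:
--         if c == " " and allow_break:
--             res.append(next_word)
--             next_word = ""
--             continue
--         if c == '"':
--             allow_break = not allow_break
--         next_word += c
--     res.append(next_word)
--     return res
--
-- def soft_wrap(msg: str, max_len: int, first_offset: int, num_indent: int = 0) -> str:
--     """Wrap a long error message into few lines.
--
--     Breaks will only happen between words, and never inside a quoted group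
--     (to avoid breaking types such as "Union[int, str]"). The 'first_offset' is
--     the width before the start of first line.
--
--     Pad every next line with 'num_indent' spaces. Every line will be at most 'max_len'
--     characters, except if it is a single word or quoted group.
--
--     For example:
--                first_offset
--         ------------------------
--         path/to/file: error: 58: Some very long error message
--             that needs to be split in separate lines.
--             "Long[Type, Names]" are never split.
--         ^^^^--------------------------------------------------
--         num_indent           max_len
--     """
--     words = split_words(msg)
--     next_line = words.pop(0)
--     lines: list[str] = []
--     while words:
--         next_word = words.pop(0)
--         max_line_len = max_len - num_indent if lines else max_len - first_offset
--         # Add 1 to account for space between words.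
--         if len(next_line) + len(next_word) + 1 <= max_line_len:
--             next_line += " " + next_word
--         else:
--             lines.append(next_line)
--             next_line = next_word
--     lines.append(next_line)
--     padding = "\n" + " " * num_indent
--     return padding.join(lines)
-- ===== SOURCE B (Python) =====
-- def soft_wrap(msg: str, max_len: int, first_offset: int, num_indent: int = 0) -> str:
--     """Single streaming pass: split into quote-aware words and greedily pack
--     them into lines at the same time, instead of building a word list first."""
--     lines: list[str] = []
--     line = None
--     word = ""
--     allow_break = True
--
--     def pack(w: str) -> None:
--         nonlocal line
--         if line is None:
--             line = w
--             return
--         budget = max_len - num_indent if lines else max_len - first_offset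
--         if len(line) + len(w) + 1 <= budget:
--             line += " " + w
--         else:
--             lines.append(line)
--             line = w
--
--     for c in msg:
--         if c == " " and allow_break:
--             pack(word)
--             word = ""
--         else:
--             if c == '"':
--                 allow_break = not allow_break
--             word += c
--     pack(word)
--     lines.append(line)
--     return ("\n" + " " * num_indent).join(lines)
-- ===== Notes on version B (the rewrite author's own statement) =====
-- stated objective: alternative
-- what changed: B fuses split_words and the packing loop into one streaming pass over the characters, packing each quote-aware word into the current line as soon as it is completed instead of first materializing the word list and popping from its front.
import Mathlib
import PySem

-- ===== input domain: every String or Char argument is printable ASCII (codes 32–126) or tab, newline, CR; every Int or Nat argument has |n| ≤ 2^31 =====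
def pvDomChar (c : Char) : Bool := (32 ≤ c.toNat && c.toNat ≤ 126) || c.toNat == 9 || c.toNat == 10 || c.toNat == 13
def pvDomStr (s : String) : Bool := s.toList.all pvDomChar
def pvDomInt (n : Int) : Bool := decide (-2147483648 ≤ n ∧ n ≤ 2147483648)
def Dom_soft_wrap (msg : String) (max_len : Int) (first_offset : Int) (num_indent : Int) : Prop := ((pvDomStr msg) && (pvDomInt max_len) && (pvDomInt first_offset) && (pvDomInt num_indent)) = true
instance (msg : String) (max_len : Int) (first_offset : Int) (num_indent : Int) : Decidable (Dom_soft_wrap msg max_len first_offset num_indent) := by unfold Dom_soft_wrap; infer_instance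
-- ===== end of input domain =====

-- B fuses split_words and the greedy packing into one streaming character pass; same return value, no speed claim.

-- str.join over a nonempty list of lines (both Pythons do padding.join(lines))
def pyJoinPad (pad : List Char) (xs : List (List Char)) : List Char :=
  match xs with
  | [] => []
  | [x] => x
  | x :: rest => x ++ pad ++ pyJoinPad pad rest

-- ===== PORT A =====
-- body of split_words' for-loop, state (next_word, res, allow_break)
def swStep (st : List Char × List (List Char) × Bool) (c : Char) :
    List Char × List (List Char) × Bool :=
  let (nw, res, ab) := st
  if c = ' ' ∧ ab then ([], res ++ [nw], ab)
  else
    let ab' := if c = '"' then !ab else ab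
    (nw ++ [c], res, ab')

def split_words_port (msg : List Char) : List (List Char) :=
  let st := msg.foldl swStep ([], [], true)
  st.2.1 ++ [st.1]

-- body of soft_wrap's while-loop, state (next_line, lines), popping one word
def wrapStep (max_len first_offset num_indent : Int)
    (st : List Char × List (List Char)) (w : List Char) : List Char × List (List Char) :=
  let (nl, lines) := st
  let mll := if lines ≠ [] then max_len - num_indent else max_len - first_offset
  if (nl.length : Int) + (w.length : Int) + 1 ≤ mll then (nl ++ ' ' :: w, lines)
  else (w, lines ++ [nl])

def soft_wrap (msg : String) (max_len : Int) (first_offset : Int) (num_indent : Int) : String :=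
  match split_words_port msg.toList with
  | [] => ""   -- unreachable: split_words always returns a nonempty list
  | w0 :: ws =>
    let st := ws.foldl (wrapStep max_len first_offset num_indent) (w0, [])
    String.ofList (pyJoinPad ('\n' :: List.replicate num_indent.toNat ' ') (st.2 ++ [st.1]))

-- ===== PORT B =====
-- pack one finished word into the in-progress line (None before the first word)
def altPack (max_len first_offset num_indent : Int)
    (lines : List (List Char)) (lo : Option (List Char)) (w : List Char) :
    List (List Char) × Option (List Char) :=
  match lo with
  | none => (lines, some w)
  | some l =>
    let budget := if lines ≠ [] then max_len - num_indent else max_len - first_offset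
    if (l.length : Int) + (w.length : Int) + 1 ≤ budget then (lines, some (l ++ ' ' :: w))
    else (lines ++ [l], some w)

-- the single streaming pass over the characters: state (lines, line, word, allow_break)
def altLoop (max_len first_offset num_indent : Int) :
    List Char → List (List Char) × Option (List Char) × List Char × Bool →
    List (List Char) × Option (List Char) × List Char × Bool
  | [], st => st
  | c :: cs, (lines, lo, word, ab) =>
    if c = ' ' ∧ ab then
      let (lines', lo') := altPack max_len first_offset num_indent lines lo word
      altLoop max_len first_offset num_indent cs (lines', lo', [], ab)
    else
      altLoop max_len first_offset num_indent cs
        (lines, lo, word ++ [c], if c = '"' then !ab else ab)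

def soft_wrap_alt (msg : String) (max_len : Int) (first_offset : Int) (num_indent : Int) : String :=
  let (lines, lo, word, _) := altLoop max_len first_offset num_indent msg.toList ([], none, [], true)
  let (lines', lo') := altPack max_len first_offset num_indent lines lo word
  String.ofList (pyJoinPad ('\n' :: List.replicate num_indent.toNat ' ') (lines' ++ [lo'.getD []]))

-- ===== PRECONDITION & SPEC =====
def Spec_soft_wrap (msg : String) (max_len : Int) (first_offset : Int) (num_indent : Int) (out : String) : Prop := out = soft_wrap_alt msg max_len first_offset num_indent
instance (msg : String) (max_len : Int) (first_offset : Int) (num_indent : Int) (out : String) : Decidable (Spec_soft_wrap msg max_len first_offset num_indent out) := by unfold Spec_soft_wrap; infer_instance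

-- ===== CLAIM (what is proved, stated in full; the proofs are below) =====
def Claim_equal_soft_wrap : Prop := ∀ (msg : String) (max_len : Int) (first_offset : Int) (num_indent : Int), Dom_soft_wrap msg max_len first_offset num_indent → Spec_soft_wrap msg max_len first_offset num_indent (soft_wrap msg max_len first_offset num_indent)

-- ===== LEMMAS AND PROOFS =====

-- reference splitter: (emitted words, trailing word, final allow_break)
def wrds : List Char → List Char → Bool → List (List Char) × List Char × Bool
  | [], nw, ab => ([], nw, ab)
  | c :: cs, nw, ab =>
    if c = ' ' ∧ ab then
      let r := wrds cs [] ab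
      (nw :: r.1, r.2)
    else wrds cs (nw ++ [c]) (if c = '"' then !ab else ab)

def packAll (max_len first_offset num_indent : Int)
    (st : List (List Char) × Option (List Char)) (ws : List (List Char)) :
    List (List Char) × Option (List Char) :=
  ws.foldl (fun p w => altPack max_len first_offset num_indent p.1 p.2 w) st

theorem split_foldl_eq (cs : List Char) : ∀ (nw : List Char) (res : List (List Char)) (ab : Bool),
    cs.foldl swStep (nw, res, ab)
    = ((wrds cs nw ab).2.1, res ++ (wrds cs nw ab).1, (wrds cs nw ab).2.2) := by
  induction cs with
  | nil => intro nw res ab; simp [wrds]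
  | cons c cs ih =>
    intro nw res ab
    by_cases h : c = ' ' ∧ ab
    · simp [swStep, wrds, if_pos h, ih]
    · simp [swStep, wrds, if_neg h, ih]

theorem altLoop_eq (max_len first_offset num_indent : Int) (cs : List Char) :
    ∀ (lines : List (List Char)) (lo : Option (List Char)) (nw : List Char) (ab : Bool),
    altLoop max_len first_offset num_indent cs (lines, lo, nw, ab)
    = ((packAll max_len first_offset num_indent (lines, lo) (wrds cs nw ab).1).1,
       (packAll max_len first_offset num_indent (lines, lo) (wrds cs nw ab).1).2,
       (wrds cs nw ab).2.1, (wrds cs nw ab).2.2) := by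
  induction cs with
  | nil => intro lines lo nw ab; simp [altLoop, wrds, packAll]
  | cons c cs ih =>
    intro lines lo nw ab
    by_cases h : c = ' ' ∧ ab
    · simp only [altLoop, wrds, if_pos h, ih, packAll, List.foldl_cons]
    · simp only [altLoop, wrds, if_neg h, ih]

theorem packAll_some (max_len first_offset num_indent : Int) (ws : List (List Char)) :
    ∀ (nl : List Char) (lines : List (List Char)),
    packAll max_len first_offset num_indent (lines, some nl) ws
    = ((ws.foldl (wrapStep max_len first_offset num_indent) (nl, lines)).2,
       some (ws.foldl (wrapStep max_len first_offset num_indent) (nl, lines)).1) := by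
  induction ws with
  | nil => intro nl lines; simp [packAll]
  | cons w ws ih =>
    intro nl lines
    by_cases h : (nl.length : Int) + (w.length : Int) + 1 ≤
        (if lines ≠ [] then max_len - num_indent else max_len - first_offset)
    · have e1 : altPack max_len first_offset num_indent lines (some nl) w
          = (lines, some (nl ++ ' ' :: w)) := by
        simp only [altPack]; split_ifs at h ⊢ <;> rfl
      have e2 : wrapStep max_len first_offset num_indent (nl, lines) w
          = (nl ++ ' ' :: w, lines) := by
        simp only [wrapStep]; split_ifs at h ⊢ <;> rfl
      simp only [packAll, List.foldl_cons, e1, e2]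
      exact ih (nl ++ ' ' :: w) lines
    · have e1 : altPack max_len first_offset num_indent lines (some nl) w
          = (lines ++ [nl], some w) := by
        simp only [altPack]; split_ifs at h ⊢ <;> rfl
      have e2 : wrapStep max_len first_offset num_indent (nl, lines) w
          = (w, lines ++ [nl]) := by
        simp only [wrapStep]; split_ifs at h ⊢ <;> rfl
      simp only [packAll, List.foldl_cons, e1, e2]
      exact ih w (lines ++ [nl])

-- ===== VERDICT (by name: the statement is the Claim_ definition above) =====
theorem soft_wrap_spec : Claim_equal_soft_wrap := by
  intro msg max_len first_offset num_indent _
  unfold Spec_soft_wrap soft_wrap soft_wrap_alt split_words_port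
  rw [split_foldl_eq, altLoop_eq]
  simp only [List.nil_append]
  rcases hw : (wrds msg.toList [] true).1 with _ | ⟨w0, ws⟩
  · simp [packAll, altPack]
  · have h0 : packAll max_len first_offset num_indent ([], none) (w0 :: ws)
        = packAll max_len first_offset num_indent ([], some w0) ws := by
      simp [packAll, altPack]
    have hlast : (fun p => altPack max_len first_offset num_indent p.1 p.2
          ((wrds msg.toList [] true).2.1))
          (packAll max_len first_offset num_indent ([], none) (w0 :: ws))
        = packAll max_len first_offset num_indent ([], some w0)
          (ws ++ [(wrds msg.toList [] true).2.1]) := by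
      rw [h0]; simp [packAll, List.foldl_append]
    have hps := packAll_some max_len first_offset num_indent
        (ws ++ [(wrds msg.toList [] true).2.1]) w0 ([] : List (List Char))
    simp only [] at hlast
    rw [hlast, hps]
    simp
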